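-- pv_equiv track=rewrite | github.com/dcheng728/brane_solns | agents/exp32e_universal_formula.py | levi_civita_4d
-- ===== SOURCE A (Python) =====
-- def levi_civita_4d(i, j, k, l):
--     perm = [i, j, k, l]
--     if len(set(perm)) < 4:
--         return 0
--     sign = 1
--     for a in range(4):
--         for b in range(a+1, 4):
--             if perm[a] > perm[b]:
--                 sign *= -1
--     return sign
-- ===== SOURCE B (Python) =====
-- def _bubble_pass(xs, sign):
--     """One bubble pass: push the largest element right, flipping sign per swap."""
--     if len(xs) < 2:
--         return xs, sign
--     x, y = xs[0], xs[1]
--     if x > y: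
--         rest, sign = _bubble_pass([x] + xs[2:], -sign)
--         return [y] + rest, sign
--     rest, sign = _bubble_pass(xs[1:], sign)
--     return [x] + rest, sign
--
-- def levi_civita_4d(i, j, k, l):
--     perm = [i, j, k, l]
--     if len(set(perm)) < 4:
--         return 0
--     sign = 1
--     for _ in range(3):
--         perm, sign = _bubble_pass(perm, sign)
--     return sign
-- ===== Notes on version B (the rewrite author's own statement) =====
-- stated objective: alternative
-- what changed: B computes the permutation sign by bubble-sorting a working copy of [i,j,k,l] while flipping a sign on each adjacent swap, instead of scanning all C(4,2) index pairs for inversions.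
import Mathlib
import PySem

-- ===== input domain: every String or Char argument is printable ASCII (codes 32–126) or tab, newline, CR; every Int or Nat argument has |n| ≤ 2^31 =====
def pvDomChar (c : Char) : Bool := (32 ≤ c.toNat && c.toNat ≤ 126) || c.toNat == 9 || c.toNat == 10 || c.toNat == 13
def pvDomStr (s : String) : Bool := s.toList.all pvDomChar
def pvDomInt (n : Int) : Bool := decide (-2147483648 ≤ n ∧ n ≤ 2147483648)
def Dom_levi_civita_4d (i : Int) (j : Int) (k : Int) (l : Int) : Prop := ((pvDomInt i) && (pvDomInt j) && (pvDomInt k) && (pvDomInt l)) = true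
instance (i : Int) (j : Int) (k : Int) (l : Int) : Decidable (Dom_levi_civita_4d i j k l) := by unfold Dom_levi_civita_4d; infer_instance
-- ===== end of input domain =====

-- B replaces the all-pairs inversion scan by bubble-sorting a copy of [i,j,k,l], flipping a sign per adjacent swap (objective: alternative).

-- ===== PORT A =====
-- perm = [i,j,k,l]; if len(set(perm)) < 4: return 0; nested pair loop multiplying sign by -1 per inversion
def levi_civita_4d (i : Int) (j : Int) (k : Int) (l : Int) : Int :=
  let perm : List Int := [i, j, k, l]
  if (PySem.Set.ofList perm).length < 4 then 0
  else
    (PySem.List.pyRange 0 4 1).foldl (fun sign a =>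
      (PySem.List.pyRange (a + 1) 4 1).foldl (fun sign b =>
        if PySem.List.pyGetD perm a 0 > PySem.List.pyGetD perm b 0 then sign * (-1) else sign) sign) 1

-- ===== PORT B =====
-- one bubble pass over the list, flipping the sign on each adjacent swap (Source B's _bubble_pass)
def bubblePass : List Int → Int → (List Int × Int)
  | x :: y :: rest, sign =>
    if x > y then
      let (r, sign') := bubblePass (x :: rest) (-sign)
      (y :: r, sign')
    else
      let (r, sign') := bubblePass (y :: rest) sign
      (x :: r, sign')
  | xs, sign => (xs, sign)

def levi_civita_4d_alt (i : Int) (j : Int) (k : Int) (l : Int) : Int :=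
  let perm : List Int := [i, j, k, l]
  if (PySem.Set.ofList perm).length < 4 then 0
  else
    -- for _ in range(3): perm, sign = _bubble_pass(perm, sign)
    ((PySem.List.pyRange 0 3 1).foldl (fun st _ => bubblePass st.1 st.2) (perm, 1)).2

-- ===== PRECONDITION & SPEC =====
def Spec_levi_civita_4d (i : Int) (j : Int) (k : Int) (l : Int) (out : Int) : Prop := out = levi_civita_4d_alt i j k l
instance (i : Int) (j : Int) (k : Int) (l : Int) (out : Int) : Decidable (Spec_levi_civita_4d i j k l out) := by unfold Spec_levi_civita_4d; infer_instance

-- ===== CLAIM (what is proved, stated in full; the proofs are below) =====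
def Claim_equal_levi_civita_4d : Prop := ∀ (i : Int) (j : Int) (k : Int) (l : Int), Dom_levi_civita_4d i j k l → Spec_levi_civita_4d i j k l (levi_civita_4d i j k l)

-- ===== LEMMAS AND PROOFS =====
theorem pvRange04 : PySem.List.pyRange 0 4 1 = [0, 1, 2, 3] := by decide
theorem pvRange14 : PySem.List.pyRange (0 + 1) 4 1 = [1, 2, 3] := by decide
theorem pvRange24 : PySem.List.pyRange (1 + 1) 4 1 = [2, 3] := by decide
theorem pvRange34 : PySem.List.pyRange (2 + 1) 4 1 = [3] := by decide
theorem pvRange44 : PySem.List.pyRange (3 + 1) 4 1 = [] := by decide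
theorem pvRange03 : PySem.List.pyRange 0 3 1 = [0, 1, 2] := by decide

theorem pvDistinct (i j k l : Int)
    (h : ¬ (PySem.Set.ofList [i, j, k, l]).length < 4) :
    i ≠ j ∧ i ≠ k ∧ i ≠ l ∧ j ≠ k ∧ j ≠ l ∧ k ≠ l := by
  refine ⟨?_, ?_, ?_, ?_, ?_, ?_⟩ <;>
    (intro e; apply h; subst e;
     simp only [PySem.Set.ofList, PySem.Set.add, List.foldl];
     split_ifs <;>
       simp_all [PySem.Set.empty, List.contains_eq_mem])

-- ===== VERDICT (by name: the statement is the Claim_ definition above) =====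
set_option maxHeartbeats 4000000 in
theorem levi_civita_4d_spec : Claim_equal_levi_civita_4d := by
  intro i j k l _
  unfold Spec_levi_civita_4d levi_civita_4d levi_civita_4d_alt
  by_cases h : (PySem.Set.ofList [i, j, k, l]).length < 4
  · simp [h]
  · obtain ⟨h1, h2, h3, h4, h5, h6⟩ := pvDistinct i j k l h
    simp only [if_neg h, pvRange04, pvRange14, pvRange24, pvRange34, pvRange44, pvRange03,
      List.foldl, PySem.List.pyGetD, PySem.List.pyGet?, PySem.List.pyIdx?]
    rcases (lt_or_gt_of_ne h1) with c1 | c1 <;> rcases (lt_or_gt_of_ne h2) with c2 | c2 <;>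
      rcases (lt_or_gt_of_ne h3) with c3 | c3 <;> rcases (lt_or_gt_of_ne h4) with c4 | c4 <;>
        rcases (lt_or_gt_of_ne h5) with c5 | c5 <;> rcases (lt_or_gt_of_ne h6) with c6 | c6 <;>
          simp [bubblePass, c1, c2, c3, c4, c5, c6,
            lt_asymm c1, lt_asymm c2, lt_asymm c3, lt_asymm c4, lt_asymm c5, lt_asymm c6] <;>
          omega
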